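-- pv_equiv track=rewrite | github.com/leonobilis/adventofcode2017 | day6/day6.py | r1
-- ===== SOURCE A (Python) =====
-- def r1(input):
--     input_len = len(input)
--     reached = []
--     counter = 0
--     while not list(filter(lambda r: len([i for i, j in zip(input, r) if i == j]) == input_len, reached)):
--         reached.append(input.copy())
--         counter += 1
--         to_redist = input.index(max(input))
--         redist_val = input[to_redist]
--         input[to_redist] = 0
--         for i in range(redist_val):
--             to_redist = 0 if to_redist + 1 == input_len else to_redist + 1
--             input[to_redist] += 1
--
--     return counter
-- ===== SOURCE B (Python) =====
-- def r1(input):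
--     # Return-value equivalent to A; unlike A, does not mutate the caller's list.
--     n = len(input)
--     state = list(input)
--     seen = set()
--     steps = 0
--     while tuple(state) not in seen:
--         seen.add(tuple(state))
--         steps += 1
--         v = max(state)
--         p = state.index(v)
--         state[p] = 0
--         if v > 0:
--             q, r = divmod(v, n)
--             state = [x + q for x in state]
--             for i in range(1, r + 1):
--                 state[(p + i) % n] += 1
--     return steps
-- ===== Notes on version B (the rewrite author's own statement) =====
-- stated objective: faster
-- what changed: Replaces A's O(v) one-at-a-time round-robin increments with a closed-form divmod redistribution (add v//n to every bucket, +1 to the v%n buckets after the maximum) and replaces A's linear scan over the list of previous states with a hash-set membership test.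
import Mathlib
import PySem

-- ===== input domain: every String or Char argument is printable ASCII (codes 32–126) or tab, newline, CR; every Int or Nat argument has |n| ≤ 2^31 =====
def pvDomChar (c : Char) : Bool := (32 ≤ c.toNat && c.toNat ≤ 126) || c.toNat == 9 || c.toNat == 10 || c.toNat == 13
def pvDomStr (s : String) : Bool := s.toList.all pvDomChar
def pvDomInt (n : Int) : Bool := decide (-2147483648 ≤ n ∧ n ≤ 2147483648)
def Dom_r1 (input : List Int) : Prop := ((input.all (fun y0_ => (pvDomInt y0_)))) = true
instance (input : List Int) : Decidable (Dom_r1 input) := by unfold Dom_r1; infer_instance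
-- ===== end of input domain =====

-- B replaces A's one-at-a-time round-robin redistribution by a closed-form divmod
-- redistribution and A's linear scan over the list of previous states by a
-- set-membership test.  A mutates its argument list in place and B does not:
-- the equivalence proved here is about the RETURN value only.
-- Both loop ports use the same fuel counter, a totality device for the 'while'
-- loop; the equivalence theorem holds for every fuel value.

-- shared fuel helper (totality device only; not part of either algorithm)
def pvFuel (input : List Int) : Nat :=
  let n := input.length
  let S := (input.map Int.natAbs).sum + 1
  ((n + 2) * S + 2) ^ n + 2

-- ===== PORT A =====
-- len([i for i, j in zip(input, r) if i == j])
def r1CountEq (input r : List Int) : Nat :=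
  ((input.zip r).filter (fun ij => ij.1 == ij.2)).length

-- for i in range(redist_val): to_redist = 0 if to_redist+1 == input_len else to_redist+1; input[to_redist] += 1
def r1Inner (n : Nat) (l : List Int) (t : Nat) : Nat → List Int
  | 0 => l
  | k+1 =>
    let t' := if t + 1 = n then 0 else t + 1
    r1Inner n (PySem.List.pySetD l (t' : Int) (PySem.List.pyGetD l (t' : Int) 0 + 1)) t' k

def r1Loop (n : Nat) (reached : List (List Int)) (counter : Int) (input : List Int) : Nat → Int
  | 0 => counter
  | fuel+1 =>
    if (reached.filter (fun r => r1CountEq input r == n)).isEmpty then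
      match PySem.List.max? input (fun x => x) with
      | none => counter + 1      -- Python raises ValueError (max of empty); outside Pre_r1
      | some m =>
        match PySem.List.index? input m with
        | none => counter + 1    -- unreachable: m ∈ input
        | some p =>
          r1Loop n (reached ++ [input]) (counter + 1)
            (r1Inner n (PySem.List.pySetD input (p : Int) 0) p
              (PySem.List.pyGetD input (p : Int) 0).toNat) fuel
    else counter

def r1 (input : List Int) : Int :=
  r1Loop input.length [] 0 input (pvFuel input)

-- ===== PORT B =====
-- state[(p + i) % n] += 1
def r1AltSpread (n : Nat) (p : Nat) (st : List Int) (i : Int) : List Int :=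
  PySem.List.pySetD st (PySem.Int.mod ((p : Int) + i) (n : Int))
    (PySem.List.pyGetD st (PySem.Int.mod ((p : Int) + i) (n : Int)) 0 + 1)

-- if v > 0: q, r = divmod(v, n); state = [x + q for x in state]; for i in range(1, r+1): state[(p+i)%n] += 1
def r1AltStep (n : Nat) (p : Nat) (v : Int) (st : List Int) : List Int :=
  if v > 0 then
    (PySem.List.pyRange 1 (PySem.Int.mod v (n : Int) + 1) 1).foldl (r1AltSpread n p)
      (st.map (· + PySem.Int.floordiv v (n : Int)))
  else st

def r1AltLoop (n : Nat) (seen : PySem.Set (List Int)) (steps : Int) (state : List Int) : Nat → Int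
  | 0 => steps
  | fuel+1 =>
    if PySem.Set.contains seen state then steps
    else
      match PySem.List.max? state (fun x => x) with
      | none => steps + 1        -- Python raises ValueError (max of empty); outside Pre_r1
      | some v =>
        match PySem.List.index? state v with
        | none => steps + 1      -- unreachable: v ∈ state
        | some p =>
          r1AltLoop n (PySem.Set.add seen state) (steps + 1)
            (r1AltStep n p v (PySem.List.pySetD state (p : Int) 0)) fuel

def r1_alt (input : List Int) : Int :=
  r1AltLoop input.length PySem.Set.empty 0 input (pvFuel input)

-- ===== PRECONDITION & SPEC =====
-- Pre_r1 excludes only the empty list, on which A raises ValueError (max of an empty sequence).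
def Pre_r1 (input : List Int) : Prop := input ≠ []
instance (input : List Int) : Decidable (Pre_r1 input) := by unfold Pre_r1; infer_instance
def pvWitness_r1 : List Int := ([3, 1, 2])
def Spec_r1 (input : List Int) (out : Int) : Prop := out = r1_alt input
instance (input : List Int) (out : Int) : Decidable (Spec_r1 input out) := by unfold Spec_r1; infer_instance

-- ===== CLAIM (what is proved, stated in full; the proofs are below) =====
def Claim_equal_r1 : Prop := ∀ (input : List Int), Dom_r1 input → Pre_r1 input → Spec_r1 input (r1 input)

-- ===== LEMMAS AND PROOFS =====

-- distance from bucket p (exclusive, going forward round the ring of n buckets) to bucket j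
def pvDist (n p j : Nat) : Nat := (j + (n - 1 - p)) % n
-- number of i ∈ [1..k] with (p+i) % n = j
def pvCnt (n p k j : Nat) : Nat := (k + (n - 1 - pvDist n p j)) / n

theorem pvDist_lt (n p j : Nat) (hn : 0 < n) : pvDist n p j < n := by
  unfold pvDist; exact Nat.mod_lt _ hn

theorem pvDist_of (n p i : Nat) (hp : p < n) (hi : i < n) :
    pvDist n p ((p + i + 1) % n) = i := by
  unfold pvDist
  rw [Nat.mod_add_mod]
  have h : p + i + 1 + (n - 1 - p) = i + n := by omega
  rw [h, Nat.add_mod_right, Nat.mod_eq_of_lt hi]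

theorem pvDist_inv (n p j : Nat) (hp : p < n) (hj : j < n) :
    (p + pvDist n p j + 1) % n = j := by
  unfold pvDist
  have h1 : p + (j + (n - 1 - p)) % n + 1 = (j + (n - 1 - p)) % n + (p + 1) := by omega
  rw [h1, Nat.mod_add_mod]
  have h2 : j + (n - 1 - p) + (p + 1) = j + n := by omega
  rw [h2, Nat.add_mod_right, Nat.mod_eq_of_lt hj]

theorem pvDist_eq_iff (n p j i : Nat) (hp : p < n) (hj : j < n) (hi : i < n) :
    pvDist n p j = i ↔ j = (p + i + 1) % n := by
  constructor
  · intro h; rw [← h]; exact (pvDist_inv n p j hp hj).symm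
  · intro h; rw [h]; exact pvDist_of n p i hp hi

theorem pvCnt_zero (n p j : Nat) (hn : 0 < n) : pvCnt n p 0 j = 0 := by
  unfold pvCnt; exact Nat.div_eq_of_lt (by omega)

theorem pvDist_succ_eq (n p : Nat) (hp : p < n) :
    pvDist n ((p + 1) % n) ((p + 1) % n) = n - 1 := by
  have hn : 0 < n := by omega
  have hp' : (p + 1) % n < n := Nat.mod_lt _ hn
  have h := pvDist_of n ((p + 1) % n) (n - 1) hp' (by omega)
  have h2 : ((p + 1) % n + (n - 1) + 1) % n = (p + 1) % n := by
    have e : (p + 1) % n + (n - 1) + 1 = (p + 1) % n + n := by omega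
    rw [e, Nat.add_mod_right, Nat.mod_eq_of_lt hp']
  rwa [h2] at h

theorem pvDist_succ_ne (n p j : Nat) (hp : p < n) (hj : j < n) (hne : pvDist n p j ≠ 0) :
    pvDist n ((p + 1) % n) j = pvDist n p j - 1 := by
  have hn : 0 < n := by omega
  have hd : pvDist n p j < n := pvDist_lt n p j hn
  have hinv := pvDist_inv n p j hp hj
  have hp' : (p + 1) % n < n := Nat.mod_lt _ hn
  have h := pvDist_of n ((p + 1) % n) (pvDist n p j - 1) hp' (by omega)
  have h2 : ((p + 1) % n + (pvDist n p j - 1) + 1) % n = j := by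
    have e1 : (p + 1) % n + (pvDist n p j - 1) + 1 = (p + 1) % n + ((pvDist n p j - 1) + 1) := by
      omega
    rw [e1, Nat.mod_add_mod]
    have e3 : p + 1 + (pvDist n p j - 1 + 1) = p + pvDist n p j + 1 := by omega
    rw [e3, hinv]
  rwa [h2] at h

theorem pvCnt_succ (n p k j : Nat) (hp : p < n) (hj : j < n) :
    pvCnt n p (k + 1) j = pvCnt n ((p + 1) % n) k j + (if j = (p + 1) % n then 1 else 0) := by
  have hn : 0 < n := by omega
  by_cases hje : j = (p + 1) % n
  · subst hje
    have hd0 : pvDist n p ((p + 1) % n) = 0 := by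
      have h := pvDist_of n p 0 hp hn
      simpa using h
    have hd1 : pvDist n ((p + 1) % n) ((p + 1) % n) = n - 1 := pvDist_succ_eq n p hp
    unfold pvCnt
    rw [hd0, hd1, if_pos rfl]
    have e1 : k + 1 + (n - 1 - 0) = k + n := by omega
    have e2 : k + (n - 1 - (n - 1)) = k := by omega
    rw [e1, e2, Nat.add_div_right _ hn]
  · have hd0 : pvDist n p j ≠ 0 := by
      intro h0
      apply hje
      have hinv := pvDist_inv n p j hp hj
      rw [h0] at hinv
      simpa using hinv.symm
    have hd := pvDist_succ_ne n p j hp hj hd0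
    have hdlt : pvDist n p j < n := pvDist_lt n p j (by omega)
    unfold pvCnt
    rw [hd, if_neg hje, Nat.add_zero]
    congr 1
    omega

theorem pvCnt_split (n p k j : Nat) (hn : 0 < n) :
    pvCnt n p k j = k / n + (if pvDist n p j < k % n then 1 else 0) := by
  unfold pvCnt
  have hdlt : pvDist n p j < n := pvDist_lt n p j hn
  have hr : k % n < n := Nat.mod_lt _ hn
  conv_lhs => rw [← Nat.mod_add_div' k n]
  rw [Nat.add_right_comm, Nat.add_mul_div_right _ _ hn]
  have h2 : (k % n + (n - 1 - pvDist n p j)) / n = if pvDist n p j < k % n then 1 else 0 := by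
    split
    · next h =>
      have hle : n ≤ k % n + (n - 1 - pvDist n p j) := by omega
      rw [Nat.div_eq_sub_div hn hle, Nat.div_eq_of_lt (by omega)]
    · next h =>
      exact Nat.div_eq_of_lt (by omega)
  rw [h2, Nat.add_comm]

theorem r1Inner_length (n : Nat) : ∀ (k : Nat) (l : List Int) (t : Nat),
    (r1Inner n l t k).length = l.length := by
  intro k
  induction k with
  | zero => intro l t; rfl
  | succ k ih => intro l t; simp [r1Inner, ih]

theorem getD_set_lt {l : List Int} {i : Nat} (hi : i < l.length) (v : Int) (j : Nat) :
    (l.set i v).getD j 0 = if j = i then v else l.getD j 0 := by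
  by_cases h : j = i
  · subst h; simp [List.getD_eq_getElem?_getD, hi]
  · have h' : ¬ i = j := fun hh => h hh.symm
    simp [List.getD_eq_getElem?_getD, h, h']

theorem r1Inner_getD (n : Nat) : ∀ (k : Nat) (l : List Int) (p j : Nat),
    l.length = n → p < n → j < n →
    (r1Inner n l p k).getD j 0 = l.getD j 0 + (pvCnt n p k j : Int) := by
  intro k
  induction k with
  | zero =>
    intro l p j hl hp hj
    rw [pvCnt_zero n p j (by omega)]
    simp [r1Inner]
  | succ k ih =>
    intro l p j hl hp hj
    have hn : 0 < n := by omega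
    have ht' : (if p + 1 = n then 0 else p + 1) = (p + 1) % n := by
      by_cases h : p + 1 = n
      · simp [h]
      · rw [if_neg h, Nat.mod_eq_of_lt (by omega)]
    have hp' : (p + 1) % n < n := Nat.mod_lt _ hn
    simp only [r1Inner, ht', PySem.List.pySetD_natCast, PySem.List.pyGetD_natCast]
    rw [ih (l.set ((p + 1) % n) (l.getD ((p + 1) % n) 0 + 1)) ((p + 1) % n) j
      (by simp [hl]) hp' hj]
    rw [getD_set_lt (by omega) _ j]
    rw [pvCnt_succ n p k j hp hj]
    by_cases hje : j = (p + 1) % n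
    · subst hje
      simp only [if_pos]
      push_cast
      ring
    · simp only [if_neg hje]
      push_cast
      ring

theorem r1AltSpread_length (n p : Nat) (st : List Int) (i : Int) :
    (r1AltSpread n p st i).length = st.length := by
  unfold r1AltSpread; simp [PySem.List.length_pySetD]

theorem foldl_spread_length (n p : Nat) : ∀ (xs : List Int) (l : List Int),
    (xs.foldl (r1AltSpread n p) l).length = l.length := by
  intro xs
  induction xs with
  | nil => intro l; rfl
  | cons x xs ih => intro l; simp [List.foldl_cons, ih, r1AltSpread_length]

theorem r1AltSpread_getD (n p : Nat) (hn : 0 < n) (st : List Int) (hst : st.length = n)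
    (ρ : Nat) (j : Nat) :
    (r1AltSpread n p st ((ρ : Int) + 1)).getD j 0
      = if j = (p + ρ + 1) % n then st.getD ((p + ρ + 1) % n) 0 + 1 else st.getD j 0 := by
  unfold r1AltSpread
  have hmodc : PySem.Int.mod ((p : Int) + ((ρ : Int) + 1)) (n : Int)
      = (((p + ρ + 1) % n : Nat) : Int) := by
    have e : (p : Int) + ((ρ : Int) + 1) = ((p + ρ + 1 : Nat) : Int) := by push_cast; ring
    rw [e, PySem.Int.mod_natCast]
  rw [hmodc]
  simp only [PySem.List.pySetD_natCast, PySem.List.pyGetD_natCast]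
  exact getD_set_lt (by have := Nat.mod_lt (p + ρ + 1) hn; omega) _ j

theorem spread_getD (n p j : Nat) (hp : p < n) (hj : j < n) :
    ∀ (ρ : Nat) (l : List Int), l.length = n → ρ ≤ n →
    ((PySem.List.pyRange 1 ((ρ : Int) + 1) 1).foldl (r1AltSpread n p) l).getD j 0
      = l.getD j 0 + (if pvDist n p j < ρ then 1 else 0) := by
  intro ρ
  induction ρ with
  | zero =>
    intro l hl _
    rw [show ((0 : Nat) : Int) + 1 = 1 by norm_num, PySem.List.pyRange_one_eq_nil (by norm_num)]
    simp
  | succ ρ ih =>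
    intro l hl hρ
    have hn : 0 < n := by omega
    have hcast : ((ρ + 1 : Nat) : Int) + 1 = ((ρ : Int) + 1) + 1 := by push_cast; ring
    rw [hcast, PySem.List.pyRange_one_succ_right (by omega), List.foldl_append,
      List.foldl_cons, List.foldl_nil]
    have hflen : ((PySem.List.pyRange 1 ((ρ : Int) + 1) 1).foldl (r1AltSpread n p) l).length
        = n := by rw [foldl_spread_length, hl]
    have hidx : (p + ρ + 1) % n < n := Nat.mod_lt _ hn
    rw [r1AltSpread_getD n p hn _ hflen ρ j]
    by_cases hji : j = (p + ρ + 1) % n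
    · rw [if_pos hji, ← hji, ih l hl (by omega)]
      have hdist : pvDist n p j = ρ :=
        (pvDist_eq_iff n p j ρ hp hj (by omega)).mpr hji
      rw [hdist]
      simp
    · rw [if_neg hji, ih l hl (by omega)]
      have hdist : pvDist n p j ≠ ρ := fun h =>
        hji ((pvDist_eq_iff n p j ρ hp hj (by omega)).mp h)
      by_cases h1 : pvDist n p j < ρ
      · rw [if_pos h1, if_pos (by omega)]
      · rw [if_neg h1, if_neg (by omega)]

theorem r1AltStep_length (n p : Nat) (v : Int) (st : List Int) :
    (r1AltStep n p v st).length = st.length := by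
  unfold r1AltStep
  split
  · rw [foldl_spread_length]; simp
  · rfl

theorem step_eq (n : Nat) (state : List Int) (hlen : state.length = n) (hn : 0 < n)
    (p : Nat) (hp : p < n) (v : Int) :
    r1Inner n (state.set p 0) p v.toNat = r1AltStep n p v (state.set p 0) := by
  unfold r1AltStep
  by_cases hv : v > 0
  · rw [if_pos hv]
    have hvn : v = ((v.toNat : Nat) : Int) := (Int.toNat_of_nonneg (le_of_lt hv)).symm
    have hq : PySem.Int.floordiv v (n : Int) = ((v.toNat / n : Nat) : Int) := by
      rw [hvn]; exact_mod_cast PySem.Int.floordiv_natCast v.toNat n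
    have hr : PySem.Int.mod v (n : Int) = ((v.toNat % n : Nat) : Int) := by
      rw [hvn]; exact_mod_cast PySem.Int.mod_natCast v.toNat n
    rw [hq, hr]
    have hstlen : (state.set p 0).length = n := by simp [hlen]
    have hmaplen : ((state.set p 0).map (· + ((v.toNat / n : Nat) : Int))).length = n := by
      simp [hlen]
    apply List.ext_getElem
    · rw [r1Inner_length, foldl_spread_length, hstlen, hmaplen]
    · intro i h1 h2
      have hi : i < n := by rw [r1Inner_length, hstlen] at h1; exact h1
      rw [← List.getD_eq_getElem _ 0 h1, ← List.getD_eq_getElem _ 0 h2]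
      rw [r1Inner_getD n v.toNat (state.set p 0) p i hstlen hp hi]
      rw [spread_getD n p i hp hi (v.toNat % n) _ hmaplen (le_of_lt (Nat.mod_lt _ hn))]
      have hmap : ((state.set p 0).map (· + ((v.toNat / n : Nat) : Int))).getD i 0
          = (state.set p 0).getD i 0 + ((v.toNat / n : Nat) : Int) := by
        rw [List.getD_eq_getElem _ 0 (by omega), List.getElem_map,
          List.getD_eq_getElem _ 0 (by omega)]
      rw [hmap, pvCnt_split n p v.toNat i hn]
      push_cast
      split_ifs <;> ring
  · rw [if_neg hv]
    have h0 : v.toNat = 0 := by omega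
    rw [h0]
    rfl

theorem countEq_le (a b : List Int) : r1CountEq a b ≤ a.length := by
  unfold r1CountEq
  calc ((a.zip b).filter (fun ij => ij.1 == ij.2)).length
      ≤ (a.zip b).length := List.length_filter_le _ _
    _ ≤ a.length := by rw [List.length_zip]; omega

theorem countEq_cons (x y : Int) (xs ys : List Int) :
    r1CountEq (x :: xs) (y :: ys) = (if x = y then 1 else 0) + r1CountEq xs ys := by
  unfold r1CountEq
  rw [List.zip_cons_cons, List.filter_cons]
  by_cases h : x = y
  · simp [h]; omega
  · simp [h]

theorem countEq_eq_iff : ∀ (a b : List Int), a.length = b.length →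
    (r1CountEq a b = a.length ↔ a = b) := by
  intro a
  induction a with
  | nil =>
    intro b h
    cases b with
    | nil => simp [r1CountEq]
    | cons y ys => simp at h
  | cons x xs ih =>
    intro b h
    cases b with
    | nil => simp at h
    | cons y ys =>
      simp only [List.length_cons] at h
      have h' : xs.length = ys.length := by omega
      rw [countEq_cons]
      have hle := countEq_le xs ys
      by_cases hxy : x = y
      · subst hxy
        rw [if_pos rfl]
        constructor
        · intro hh
          have : xs = ys := (ih ys h').mp (by simp at hh ⊢; omega)
          rw [this]
        · intro hh
          have hts : xs = ys := by injection hh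
          have := (ih ys h').mpr hts
          simp
          omega
      · rw [if_neg hxy]
        constructor
        · intro hh
          exfalso
          simp at hh
          omega
        · intro hh
          injection hh with h1 _
          exact absurd h1 hxy

theorem cond_eq (n : Nat) (reached : List (List Int)) (input : List Int)
    (hr : ∀ r ∈ reached, r.length = n) (hi : input.length = n) :
    (reached.filter (fun r => r1CountEq input r == n)).isEmpty
      = !(PySem.Set.contains reached input) := by
  by_cases hmem : input ∈ reached
  · have hpred : (r1CountEq input input == n) = true := by
      rw [beq_iff_eq, ← hi]
      exact (countEq_eq_iff input input rfl).mpr rfl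
    have hinf : input ∈ reached.filter (fun r => r1CountEq input r == n) :=
      List.mem_filter.mpr ⟨hmem, hpred⟩
    have h2 : PySem.Set.contains reached input = true := by
      simp [hmem]
    rw [h2]
    simp only [Bool.not_true]
    rw [List.isEmpty_eq_false_iff]
    exact List.ne_nil_of_mem hinf
  · have h2 : PySem.Set.contains reached input = false := by
      simp [hmem]
    rw [h2]
    simp only [Bool.not_false]
    rw [List.isEmpty_iff, List.filter_eq_nil_iff]
    intro r hrm hpred
    rw [beq_iff_eq] at hpred
    have : input = r :=
      (countEq_eq_iff input r (by rw [hi, hr r hrm])).mp (by rw [hpred, hi])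
    exact hmem (this ▸ hrm)

theorem loop_eq (n : Nat) (hn : 0 < n) : ∀ (fuel : Nat) (reached : List (List Int))
    (counter : Int) (state : List Int),
    (∀ r ∈ reached, r.length = n) → state.length = n →
    r1Loop n reached counter state fuel = r1AltLoop n reached counter state fuel := by
  intro fuel
  induction fuel with
  | zero => intro reached counter state _ _; rfl
  | succ fuel ih =>
    intro reached counter state hr hs
    have hcond := cond_eq n reached state hr hs
    simp only [r1Loop, r1AltLoop]
    cases hc : PySem.Set.contains reached state with
    | true =>
      rw [hc] at hcond
      simp only [Bool.not_true] at hcond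
      rw [hcond]
      simp
    | false =>
      rw [hc] at hcond
      simp only [Bool.not_false] at hcond
      rw [hcond]
      simp only [Bool.false_eq_true, if_true, if_false]
      have hne : state ≠ [] := by
        intro h; rw [h] at hs; simp at hs; omega
      obtain ⟨m, hm⟩ : ∃ m, (PySem.List.max? state (fun x => x)) = some m := by
        cases hmm : PySem.List.max? state (fun x => x) with
        | none => rw [PySem.List.max?_eq_none_iff] at hmm; exact absurd hmm hne
        | some m => exact ⟨m, rfl⟩
      have hmem : m ∈ state := PySem.List.max?_mem hm
      obtain ⟨p, hidx⟩ : ∃ p, PySem.List.index? state m = some p := by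
        cases hii : PySem.List.index? state m with
        | none => rw [PySem.List.index?_eq_none_iff] at hii; exact absurd hmem hii
        | some p => exact ⟨p, rfl⟩
      obtain ⟨hplt, hgetp, -⟩ := PySem.List.getElem_of_index?_eq_some hidx
      have hnotmem : state ∉ reached := by
        intro hmm
        simp [hmm] at hc
      have hadd : PySem.Set.add reached state = reached ++ [state] :=
        PySem.Set.add_of_not_mem hnotmem
      simp only [hm, hidx, PySem.List.pyGetD_natCast, PySem.List.pySetD_natCast]
      rw [List.getD_eq_getElem _ _ hplt, hgetp]
      rw [step_eq n state hs hn p (by omega) m]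
      rw [hadd]
      apply ih
      · intro r hrm
        rcases List.mem_append.mp hrm with h | h
        · exact hr r h
        · simp at h; rw [h]; exact hs
      · rw [r1AltStep_length]
        simp [hs]

-- ===== VERDICT (by name: the statement is the Claim_ definition above) =====
theorem r1_spec : Claim_equal_r1 := by
  intro input _ hpre
  unfold Spec_r1 r1 r1_alt
  have hn : 0 < input.length := List.length_pos_of_ne_nil hpre
  exact loop_eq input.length hn (pvFuel input) [] 0 input (by simp) rfl
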